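-- pv_equiv track=rewrite | github.com/mort13/Rock-Capture-CNN | core/pipeline.py | _apply_format_pattern
-- ===== SOURCE A (Python) =====
-- def _apply_format_pattern(pattern: str, predicted: str) -> str:
--     """
--     Merge CNN predictions into a format pattern.
--
--     'x' positions are filled from predicted (left to right).
--     All other characters are inserted literally without CNN involvement.
--
--     Examples:
--         pattern="xx%",   predicted="75"  -> "75%"
--         pattern="xxx.xx", predicted="12345" -> "123.45"
--     """
--     result = []
--     pred_idx = 0
--     for ch in pattern:
--         if ch == "x":
--             result.append(predicted[pred_idx] if pred_idx < len(predicted) else "?")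
--             pred_idx += 1
--         else:
--             result.append(ch)
--     return "".join(result)
-- ===== SOURCE B (Python) =====
-- def _apply_format_pattern(pattern: str, predicted: str) -> str:
--     # Split the pattern at the 'x' slots, pad the predicted characters with '?'
--     # up to the number of slots, then interleave fills with the literal segments.
--     segments = pattern.split("x")
--     n = len(segments) - 1
--     taken = list(predicted[:n])
--     fills = taken + ["?"] * (n - len(taken))
--     out = list(segments[0])
--     for fill, seg in zip(fills, segments[1:]):
--         out.append(fill)
--         out.extend(seg)
--     return "".join(out)
-- ===== Notes on version B (the rewrite author's own statement) =====
-- stated objective: alternative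
-- what changed: Replaces the counter-driven character-by-character pass with a split-based decomposition: split the pattern on 'x', pad the predictions with '?' to the number of slots, and interleave fills with the literal segments; str.split and slicing move the per-character work into C, a constant-factor speedup.
import Mathlib
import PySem

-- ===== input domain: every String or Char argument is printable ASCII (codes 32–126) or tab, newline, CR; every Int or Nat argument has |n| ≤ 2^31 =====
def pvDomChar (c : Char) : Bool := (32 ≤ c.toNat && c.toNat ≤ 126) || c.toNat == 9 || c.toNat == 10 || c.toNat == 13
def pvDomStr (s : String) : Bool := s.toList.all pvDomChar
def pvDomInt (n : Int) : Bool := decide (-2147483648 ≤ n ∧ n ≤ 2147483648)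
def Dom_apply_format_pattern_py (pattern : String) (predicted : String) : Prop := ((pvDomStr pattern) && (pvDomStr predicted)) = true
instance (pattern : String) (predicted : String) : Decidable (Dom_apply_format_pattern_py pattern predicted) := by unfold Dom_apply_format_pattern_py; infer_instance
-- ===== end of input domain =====

-- B replaces A's counter-driven per-character pass by a split-on-'x' / pad / interleave
-- decomposition (objective: alternative; same O(n), measured constant-factor faster in Python).

-- ===== PORT A =====
-- the loop: state (result, pred_idx); predicted[pred_idx] is guarded by pred_idx < len(predicted)
def apply_format_pattern_py (pattern : String) (predicted : String) : String :=
  let p := predicted.toList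
  let st := pattern.toList.foldl
    (fun (st : List Char × Nat) ch =>
      if ch = 'x' then
        (st.1 ++ [if st.2 < p.length then p.getD st.2 '?' else '?'], st.2 + 1)
      else
        (st.1 ++ [ch], st.2))
    ([], 0)
  String.ofList st.1

-- ===== PORT B =====
-- pattern.split("x") for the one-character separator is exactly List.splitOn 'x';
-- predicted[:n] with n ≥ 0 is exactly List.take n; segments[0] exists since split is never empty (headI).
def apply_format_pattern_py_alt (pattern : String) (predicted : String) : String :=
  let segments := pattern.toList.splitOn 'x'
  let n := segments.length - 1
  let taken := predicted.toList.take n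
  let fills := taken ++ List.replicate (n - taken.length) '?'
  String.ofList ((List.zip fills segments.tail).foldl (fun acc fs => acc ++ fs.1 :: fs.2) segments.headI)

-- ===== PRECONDITION & SPEC =====
def Spec_apply_format_pattern_py (pattern : String) (predicted : String) (out : String) : Prop := out = apply_format_pattern_py_alt pattern predicted
instance (pattern : String) (predicted : String) (out : String) : Decidable (Spec_apply_format_pattern_py pattern predicted out) := by unfold Spec_apply_format_pattern_py; infer_instance

-- ===== CLAIM (what is proved, stated in full; the proofs are below) =====
def Claim_equal_apply_format_pattern_py : Prop := ∀ (pattern : String) (predicted : String), Dom_apply_format_pattern_py pattern predicted → Spec_apply_format_pattern_py pattern predicted (apply_format_pattern_py pattern predicted)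

-- ===== LEMMAS AND PROOFS =====

-- common reference form: fill 'x' slots from the front of q, '?' when q is exhausted
def pvMerge : List Char → List Char → List Char
  | [], _ => []
  | c :: t, q => if c = 'x' then q.headD '?' :: pvMerge t q.tail else c :: pvMerge t q

-- A's fold computes pvMerge of the remaining predicted suffix
theorem pvA_foldl (q : List Char) (l : List Char) :
    ∀ (acc : List Char) (i : Nat),
    (l.foldl (fun (st : List Char × Nat) ch =>
        if ch = 'x' then
          (st.1 ++ [if st.2 < q.length then q.getD st.2 '?' else '?'], st.2 + 1)
        else (st.1 ++ [ch], st.2)) (acc, i)).1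
      = acc ++ pvMerge l (q.drop i) := by
  induction l with
  | nil => intro acc i; simp [pvMerge]
  | cons c t ih =>
    intro acc i
    by_cases hc : c = 'x'
    · have hhead : (if i < q.length then q.getD i '?' else '?') = (q.drop i).headD '?' := by
        rcases Nat.lt_or_ge i q.length with h | h
        · simp [h, List.getD_eq_getElem?_getD, List.headD_eq_head?_getD, List.head?_drop]
        · simp [Nat.not_lt.mpr h, List.drop_eq_nil_of_le h]
      have htail : q.drop (i + 1) = (q.drop i).tail := by
        rw [← List.drop_drop]; simp
      simp only [List.foldl_cons, hc, if_pos]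
      rw [ih, htail, hhead]
      simp [pvMerge]
    · simp only [List.foldl_cons, if_neg hc]
      rw [ih]
      simp [pvMerge, hc]

-- the fills list peels off one head when there is one more slot
theorem pvFills_succ (q : List Char) (m : Nat) :
    q.take (m + 1) ++ List.replicate ((m + 1) - (q.take (m + 1)).length) '?'
      = q.headD '?' :: (q.tail.take m ++ List.replicate (m - (q.tail.take m).length) '?') := by
  cases q with
  | nil => simp [List.replicate_succ]
  | cons a q' => simp [List.take_succ_cons]

-- folding the interleave step from a cons-initial accumulator peels the head
theorem pvFoldl_cons (z : List (Char × List Char)) : ∀ (a : Char) (init : List Char),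
    z.foldl (fun acc fs => acc ++ fs.1 :: fs.2) (a :: init)
      = a :: z.foldl (fun acc fs => acc ++ fs.1 :: fs.2) init := by
  induction z with
  | nil => intro a init; rfl
  | cons hd tl ih =>
    intro a init
    simp only [List.foldl_cons, List.cons_append]
    exact ih a (init ++ hd.1 :: hd.2)

-- B's split/pad/interleave computes pvMerge
theorem pvB_eq_merge (l : List Char) : ∀ (q : List Char),
    (List.zip
        ((q.take ((l.splitOn 'x').length - 1)) ++
          List.replicate (((l.splitOn 'x').length - 1) - (q.take ((l.splitOn 'x').length - 1)).length) '?')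
        (l.splitOn 'x').tail).foldl (fun acc fs => acc ++ fs.1 :: fs.2) (l.splitOn 'x').headI
      = pvMerge l q := by
  induction l with
  | nil => intro q; simp [List.splitOn, List.splitOnP_nil, pvMerge]
  | cons c t ih =>
    intro q
    rcases hS : t.splitOn 'x' with _ | ⟨s0, S'⟩
    · exact absurd hS (List.splitOnP_ne_nil _ t)
    have ihq : ∀ r : List Char,
        (List.zip (r.take S'.length ++ List.replicate (S'.length - (r.take S'.length).length) '?')
            S').foldl (fun acc fs => acc ++ fs.1 :: fs.2) s0 = pvMerge t r := by
      intro r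
      have h := ih r
      rw [hS] at h
      simpa using h
    by_cases hc : c = 'x'
    · have hsplit : (c :: t).splitOn 'x' = [] :: s0 :: S' := by
        simp only [List.splitOn] at hS ⊢
        simp [List.splitOnP_cons, hc, hS]
      rw [hsplit]
      simp only [List.length_cons, Nat.add_sub_cancel, List.tail_cons, List.headI]
      rw [pvFills_succ q S'.length]
      simp only [List.zip_cons_cons, List.foldl_cons, List.nil_append]
      rw [pvFoldl_cons]
      rw [ihq q.tail]
      simp [pvMerge, hc]
    · have hsplit : (c :: t).splitOn 'x' = (c :: s0) :: S' := by
        simp only [List.splitOn] at hS ⊢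
        simp [List.splitOnP_cons, hc, hS]
      rw [hsplit]
      simp only [List.length_cons, Nat.add_sub_cancel, List.tail_cons, List.headI]
      rw [pvFoldl_cons]
      rw [ihq q]
      simp [pvMerge, hc]

-- ===== VERDICT (by name: the statement is the Claim_ definition above) =====
theorem apply_format_pattern_py_spec : Claim_equal_apply_format_pattern_py := by
  unfold Claim_equal_apply_format_pattern_py
  intro pattern predicted _
  unfold Spec_apply_format_pattern_py apply_format_pattern_py apply_format_pattern_py_alt
  simp only
  rw [pvA_foldl predicted.toList pattern.toList [] 0]
  rw [List.drop_zero, List.nil_append]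
  rw [← pvB_eq_merge pattern.toList predicted.toList]
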